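-- pv_equiv track=rewrite | github.com/jingyan-li/PeMS-Data | historical_agent/browser.py | _match_option
-- ===== SOURCE A (Python) =====
-- def _match_option(
--     options: list[dict[str, str]],
--     requested_value: str,
--     logical_name: str,
-- ) -> dict[str, str] | None:
--     requested = requested_value.strip()
--     lower_requested = requested.lower()
--
--     for key in ("value", "label"):
--         for option in options:
--             candidate = option.get(key, "").strip()
--             if candidate == requested:
--                 return option
--
--     for key in ("value", "label"):
--         for option in options:
--             candidate = option.get(key, "").strip().lower()
--             if candidate == lower_requested:
--                 return option
--
--     if logical_name == "district" and requested.isdigit():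
--         district_label = f"district {requested}"
--         for option in options:
--             if option.get("label", "").strip().lower() == district_label:
--                 return option
--
--     return None
-- ===== SOURCE B (Python) =====
-- def _match_option(
--     options: list[dict[str, str]],
--     requested_value: str,
--     logical_name: str,
-- ) -> dict[str, str] | None:
--     requested = requested_value.strip()
--     lower_requested = requested.lower()
--     district_ok = logical_name == "district" and requested.isdigit()
--     district_label = "district " + requested
--
--     best = None
--     best_rank = 5
--     for option in options:
--         value = option.get("value", "").strip()
--         label = option.get("label", "").strip()
--         if value == requested:
--             rank = 0
--         elif label == requested:
--             rank = 1
--         elif value.lower() == lower_requested: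
--             rank = 2
--         elif label.lower() == lower_requested:
--             rank = 3
--         elif district_ok and label.lower() == district_label:
--             rank = 4
--         else:
--             rank = 5
--         if rank < best_rank:
--             best, best_rank = option, rank
--     return best
-- ===== Notes on version B (the rewrite author's own statement) =====
-- stated objective: simpler
-- what changed: Replaces A's five sequential scans of the option list (value-exact, label-exact, value-lower, label-lower, district-label) by a single pass that computes each option's priority rank with one elif chain and keeps the first option of the lowest rank seen.
import Mathlib
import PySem

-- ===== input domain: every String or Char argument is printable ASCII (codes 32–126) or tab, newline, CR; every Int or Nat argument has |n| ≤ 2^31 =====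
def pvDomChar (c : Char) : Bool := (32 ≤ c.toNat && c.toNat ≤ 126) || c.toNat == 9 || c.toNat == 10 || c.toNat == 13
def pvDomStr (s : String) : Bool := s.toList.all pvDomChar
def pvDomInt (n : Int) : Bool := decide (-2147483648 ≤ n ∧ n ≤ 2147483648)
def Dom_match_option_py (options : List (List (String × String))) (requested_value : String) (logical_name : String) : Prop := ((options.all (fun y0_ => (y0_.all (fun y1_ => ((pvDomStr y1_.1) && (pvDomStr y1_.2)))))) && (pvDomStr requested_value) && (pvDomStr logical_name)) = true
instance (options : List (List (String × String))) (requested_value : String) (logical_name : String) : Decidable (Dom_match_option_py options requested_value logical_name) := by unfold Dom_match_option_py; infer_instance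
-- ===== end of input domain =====

-- B replaces A's five sequential scans over the option list by a single pass that tracks
-- the best (lowest) priority rank seen so far (objective: simpler single-pass; same asymptotic cost).

-- shared accessor: option.get(key, "")
def dget (o : List (String × String)) (k : String) : String := (PySem.Dict.mk o).getD k ""

-- ===== PORT A =====
def match_option_py (options : List (List (String × String))) (requested_value : String) (logical_name : String) : Option (List (String × String)) :=
  let requested := PySem.Str.strip requested_value
  let lower_requested := PySem.Str.lower requested
  match ["value", "label"].findSome? (fun key =>
      options.find? (fun option => PySem.Str.strip (dget option key) == requested)) with
  | some option => some option
  | none =>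
    match ["value", "label"].findSome? (fun key =>
        options.find? (fun option => PySem.Str.lower (PySem.Str.strip (dget option key)) == lower_requested)) with
    | some option => some option
    | none =>
      if logical_name == "district" && PySem.Str.strIsdigit requested then
        let district_label := "district " ++ requested
        options.find? (fun option => PySem.Str.lower (PySem.Str.strip (dget option "label")) == district_label)
      else none

-- ===== PORT B =====
-- the elif-chain of Source B: priority rank of one option (5 = no match)
def rankB (requested lower_requested district_label : String) (district_ok : Bool) (option : List (String × String)) : Nat :=
  let value := PySem.Str.strip (dget option "value")
  let label := PySem.Str.strip (dget option "label")
  if value == requested then 0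
  else if label == requested then 1
  else if PySem.Str.lower value == lower_requested then 2
  else if PySem.Str.lower label == lower_requested then 3
  else if district_ok && (PySem.Str.lower label == district_label) then 4
  else 5

def match_option_py_alt (options : List (List (String × String))) (requested_value : String) (logical_name : String) : Option (List (String × String)) :=
  let requested := PySem.Str.strip requested_value
  let lower_requested := PySem.Str.lower requested
  let district_ok := (logical_name == "district") && PySem.Str.strIsdigit requested
  let district_label := "district " ++ requested
  (options.foldl
    (fun (st : Option (List (String × String)) × Nat) option =>
      let rank := rankB requested lower_requested district_label district_ok option
      if rank < st.2 then (some option, rank) else st)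
    (none, 5)).1

-- ===== PRECONDITION & SPEC =====
def Spec_match_option_py (options : List (List (String × String))) (requested_value : String) (logical_name : String) (out : Option (List (String × String))) : Prop := out = match_option_py_alt options requested_value logical_name
instance (options : List (List (String × String))) (requested_value : String) (logical_name : String) (out : Option (List (String × String))) : Decidable (Spec_match_option_py options requested_value logical_name out) := by unfold Spec_match_option_py; infer_instance

-- ===== CLAIM (what is proved, stated in full; the proofs are below) =====
def Claim_equal_match_option_py : Prop := ∀ (options : List (List (String × String))) (requested_value : String) (logical_name : String), Dom_match_option_py options requested_value logical_name → Spec_match_option_py options requested_value logical_name (match_option_py options requested_value logical_name)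

-- ===== LEMMAS AND PROOFS =====

-- minimum rank over a list of options (5 if none matches)
def minR (req lreq dl : String) (g : Bool) (xs : List (List (String × String))) : Nat :=
  xs.foldr (fun o m => min (rankB req lreq dl g o) m) 5

theorem pv_rankB_le_five (req lreq dl : String) (g : Bool) (o : List (String × String)) :
    rankB req lreq dl g o ≤ 5 := by
  unfold rankB; dsimp only; split_ifs <;> omega

theorem pv_minR_cons (req lreq dl : String) (g : Bool) (a : List (String × String))
    (t : List (List (String × String))) :
    minR req lreq dl g (a :: t) = min (rankB req lreq dl g a) (minR req lreq dl g t) := rfl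

theorem pv_minR_le_five (req lreq dl : String) (g : Bool) (xs : List (List (String × String))) :
    minR req lreq dl g xs ≤ 5 := by
  induction xs with
  | nil => exact le_refl 5
  | cons a t ih => rw [pv_minR_cons]; omega

theorem pv_minR_le (req lreq dl : String) (g : Bool) {xs : List (List (String × String))}
    {o : List (String × String)} (h : o ∈ xs) : minR req lreq dl g xs ≤ rankB req lreq dl g o := by
  induction xs with
  | nil => cases h
  | cons a t ih =>
    rw [pv_minR_cons]
    rcases List.mem_cons.mp h with h | h
    · subst h; omega
    · have := ih h; omega

theorem pv_minR_attained (req lreq dl : String) (g : Bool) {xs : List (List (String × String))}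
    (h : minR req lreq dl g xs < 5) : ∃ o ∈ xs, rankB req lreq dl g o = minR req lreq dl g xs := by
  induction xs with
  | nil => exact absurd h (by simp [minR])
  | cons a t ih =>
    rw [pv_minR_cons] at h ⊢
    by_cases hc : minR req lreq dl g t < rankB req lreq dl g a
    · obtain ⟨o, ho, he⟩ := ih (by omega)
      exact ⟨o, List.mem_cons_of_mem _ ho, by omega⟩
    · exact ⟨a, List.mem_cons_self, by omega⟩

theorem pv_find?_congr {α : Type} (p q : α → Bool) (xs : List α) (h : ∀ o ∈ xs, p o = q o) :
    xs.find? p = xs.find? q := by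
  induction xs with
  | nil => rfl
  | cons a t ih =>
    have ha := h a List.mem_cons_self
    simp only [List.find?_cons, ha]
    cases q a
    · exact ih (fun o ho => h o (List.mem_cons_of_mem _ ho))
    · rfl

-- characterization of B's fold
theorem pv_foldl_char (req lreq dl : String) (g : Bool) (xs : List (List (String × String)))
    (b : Option (List (String × String))) (r : Nat) (hr : r ≤ 5) :
    xs.foldl
      (fun (st : Option (List (String × String)) × Nat) option =>
        let rank := rankB req lreq dl g option
        if rank < st.2 then (some option, rank) else st)
      (b, r)
    = if minR req lreq dl g xs < r then
        (xs.find? (fun o => rankB req lreq dl g o == minR req lreq dl g xs), minR req lreq dl g xs)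
      else (b, r) := by
  induction xs generalizing b r with
  | nil =>
    rw [List.foldl_nil, if_neg (by show ¬ ((5:ℕ) < r); omega)]
  | cons a t ih =>
    have hat := pv_rankB_le_five req lreq dl g a
    have hmt := pv_minR_le_five req lreq dl g t
    have hstep :
        (let rank := rankB req lreq dl g a
         if rank < (Prod.mk b r).2 then (some a, rank) else (b, r))
        = if rankB req lreq dl g a < r then (some a, rankB req lreq dl g a) else (b, r) := rfl
    rw [List.foldl_cons]
    rw [hstep]
    by_cases hfa : rankB req lreq dl g a < r
    · rw [if_pos hfa, ih (some a) (rankB req lreq dl g a) hat]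
      by_cases hlt : minR req lreq dl g t < rankB req lreq dl g a
      · rw [if_pos hlt, pv_minR_cons, Nat.min_eq_right (by omega)]
        rw [if_pos (by omega), List.find?_cons_of_neg (by simp; omega)]
      · rw [if_neg hlt, pv_minR_cons, Nat.min_eq_left (by omega)]
        rw [if_pos (by omega), List.find?_cons_of_pos (by simp)]
    · rw [if_neg hfa, ih b r hr]
      by_cases hlt : minR req lreq dl g t < r
      · rw [if_pos hlt, pv_minR_cons, Nat.min_eq_right (by omega)]
        rw [if_pos (by omega), List.find?_cons_of_neg (by simp; omega)]
      · rw [if_neg hlt, pv_minR_cons, if_neg (by omega)]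

-- per-option relations between A's pass conditions and the rank
theorem pv_rank_eq_zero_iff (req lreq dl : String) (g : Bool) (o : List (String × String)) :
    rankB req lreq dl g o = 0 ↔ (PySem.Str.strip (dget o "value") == req) = true := by
  unfold rankB; dsimp only; split_ifs <;> simp_all

theorem pv_rank_le_of_c1 (req lreq dl : String) (g : Bool) (o : List (String × String))
    (h : (PySem.Str.strip (dget o "label") == req) = true) : rankB req lreq dl g o ≤ 1 := by
  unfold rankB; dsimp only; split_ifs <;> simp_all

theorem pv_c1_of_rank (req lreq dl : String) (g : Bool) (o : List (String × String))
    (h : rankB req lreq dl g o = 1) : (PySem.Str.strip (dget o "label") == req) = true := by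
  unfold rankB at h; dsimp only at h; split_ifs at h <;> simp_all

theorem pv_rank_le_of_c2 (req lreq dl : String) (g : Bool) (o : List (String × String))
    (h : (PySem.Str.lower (PySem.Str.strip (dget o "value")) == lreq) = true) :
    rankB req lreq dl g o ≤ 2 := by
  unfold rankB; dsimp only; split_ifs <;> simp_all

theorem pv_c2_of_rank (req lreq dl : String) (g : Bool) (o : List (String × String))
    (h : rankB req lreq dl g o = 2) :
    (PySem.Str.lower (PySem.Str.strip (dget o "value")) == lreq) = true := by
  unfold rankB at h; dsimp only at h; split_ifs at h <;> simp_all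

theorem pv_rank_le_of_c3 (req lreq dl : String) (g : Bool) (o : List (String × String))
    (h : (PySem.Str.lower (PySem.Str.strip (dget o "label")) == lreq) = true) :
    rankB req lreq dl g o ≤ 3 := by
  unfold rankB; dsimp only; split_ifs <;> simp_all

theorem pv_c3_of_rank (req lreq dl : String) (g : Bool) (o : List (String × String))
    (h : rankB req lreq dl g o = 3) :
    (PySem.Str.lower (PySem.Str.strip (dget o "label")) == lreq) = true := by
  unfold rankB at h; dsimp only at h; split_ifs at h <;> simp_all

theorem pv_rank_le_of_c4 (req lreq dl : String) (g : Bool) (o : List (String × String))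
    (h : (g && (PySem.Str.lower (PySem.Str.strip (dget o "label")) == dl)) = true) :
    rankB req lreq dl g o ≤ 4 := by
  unfold rankB; dsimp only; split_ifs <;> simp_all

theorem pv_c4_of_rank (req lreq dl : String) (g : Bool) (o : List (String × String))
    (h : rankB req lreq dl g o = 4) :
    g = true ∧ (PySem.Str.lower (PySem.Str.strip (dget o "label")) == dl) = true := by
  unfold rankB at h; dsimp only at h; split_ifs at h <;> simp_all

-- B computes: the first option of minimal rank (none if no option matches)
theorem pv_alt_char (options : List (List (String × String))) (rv ln : String) :
    match_option_py_alt options rv ln =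
      (if minR (PySem.Str.strip rv) (PySem.Str.lower (PySem.Str.strip rv))
             ("district " ++ PySem.Str.strip rv)
             ((ln == "district") && PySem.Str.strIsdigit (PySem.Str.strip rv)) options < 5 then
        options.find? (fun o =>
          rankB (PySem.Str.strip rv) (PySem.Str.lower (PySem.Str.strip rv))
            ("district " ++ PySem.Str.strip rv)
            ((ln == "district") && PySem.Str.strIsdigit (PySem.Str.strip rv)) o ==
          minR (PySem.Str.strip rv) (PySem.Str.lower (PySem.Str.strip rv))
            ("district " ++ PySem.Str.strip rv)
            ((ln == "district") && PySem.Str.strIsdigit (PySem.Str.strip rv)) options)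
      else none) := by
  unfold match_option_py_alt
  dsimp only
  rw [pv_foldl_char _ _ _ _ _ none 5 (le_refl 5)]
  split_ifs <;> rfl

-- ===== VERDICT (by name: the statement is the Claim_ definition above) =====
theorem match_option_py_spec : Claim_equal_match_option_py := by
  intro options rv ln _dom
  unfold Spec_match_option_py
  rw [pv_alt_char]
  set req := PySem.Str.strip rv with hreq
  set lreq := PySem.Str.lower req with hlreq
  set dl := ("district " ++ req : String) with hdl
  set g := ((ln == "district") && PySem.Str.strIsdigit req) with hg
  set m := minR req lreq dl g options with hmm
  have hm5 : m ≤ 5 := pv_minR_le_five _ _ _ _ _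
  have hA : match_option_py options rv ln =
      (match options.find? (fun o => PySem.Str.strip (dget o "value") == req) with
       | some option => some option
       | none =>
       match options.find? (fun o => PySem.Str.strip (dget o "label") == req) with
       | some option => some option
       | none =>
       match options.find? (fun o => PySem.Str.lower (PySem.Str.strip (dget o "value")) == lreq) with
       | some option => some option
       | none =>
       match options.find? (fun o => PySem.Str.lower (PySem.Str.strip (dget o "label")) == lreq) with
       | some option => some option
       | none =>
         if g then options.find? (fun o => PySem.Str.lower (PySem.Str.strip (dget o "label")) == dl)
         else none) := by
    unfold match_option_py
    simp only [List.findSome?_cons, List.findSome?_nil, ← hreq, ← hlreq, ← hg, ← hdl]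
    rcases options.find? (fun o => PySem.Str.strip (dget o "value") == req) with _ | w0
    · rcases options.find? (fun o => PySem.Str.strip (dget o "label") == req) with _ | w1
      · rcases options.find? (fun o => PySem.Str.lower (PySem.Str.strip (dget o "value")) == lreq) with _ | w2
        · rcases options.find? (fun o => PySem.Str.lower (PySem.Str.strip (dget o "label")) == lreq) with _ | w3 <;> rfl
        · rfl
      · rfl
    · rfl
  rw [hA]
  have hn0 : 1 ≤ m → options.find? (fun o => PySem.Str.strip (dget o "value") == req) = none := by
    intro h1; apply List.find?_eq_none.mpr; intro o ho hc
    have h2 := pv_minR_le req lreq dl g ho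
    rw [(pv_rank_eq_zero_iff req lreq dl g o).mpr hc] at h2; omega
  have hn1 : 2 ≤ m → options.find? (fun o => PySem.Str.strip (dget o "label") == req) = none := by
    intro h1; apply List.find?_eq_none.mpr; intro o ho hc
    have h2 := pv_minR_le req lreq dl g ho
    have := pv_rank_le_of_c1 req lreq dl g o hc; omega
  have hn2 : 3 ≤ m → options.find? (fun o => PySem.Str.lower (PySem.Str.strip (dget o "value")) == lreq) = none := by
    intro h1; apply List.find?_eq_none.mpr; intro o ho hc
    have h2 := pv_minR_le req lreq dl g ho
    have := pv_rank_le_of_c2 req lreq dl g o hc; omega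
  have hn3 : 4 ≤ m → options.find? (fun o => PySem.Str.lower (PySem.Str.strip (dget o "label")) == lreq) = none := by
    intro h1; apply List.find?_eq_none.mpr; intro o ho hc
    have h2 := pv_minR_le req lreq dl g ho
    have := pv_rank_le_of_c3 req lreq dl g o hc; omega
  have hn4 : 5 ≤ m → g = true → options.find? (fun o => PySem.Str.lower (PySem.Str.strip (dget o "label")) == dl) = none := by
    intro h1 hgt; apply List.find?_eq_none.mpr; intro o ho hc
    have h2 := pv_minR_le req lreq dl g ho
    have := pv_rank_le_of_c4 req lreq dl g o (by rw [hgt]; simpa using hc); omega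
  rcases (show m = 0 ∨ m = 1 ∨ m = 2 ∨ m = 3 ∨ m = 4 ∨ m = 5 by omega) with h | h | h | h | h | h
  · -- m = 0
    have he : options.find? (fun o => PySem.Str.strip (dget o "value") == req)
        = options.find? (fun o => rankB req lreq dl g o == m) := by
      apply pv_find?_congr
      intro o ho
      have hlo := pv_minR_le req lreq dl g ho
      rw [← hmm] at hlo
      rcases hb : (PySem.Str.strip (dget o "value") == req) with _ | _
      · symm; simp only [beq_eq_false_iff_ne, ne_eq]; intro hr0
        rw [h] at hr0
        rw [(pv_rank_eq_zero_iff req lreq dl g o).mp hr0] at hb; cases hb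
      · symm; rw [h]; simp [(pv_rank_eq_zero_iff req lreq dl g o).mpr hb]
    obtain ⟨o, ho, hr⟩ := pv_minR_attained req lreq dl g (show minR req lreq dl g options < 5 by omega)
    have hsome : (options.find? (fun o => rankB req lreq dl g o == m)).isSome := by
      rw [List.find?_isSome]; exact ⟨o, ho, by simp [hr, hmm]⟩
    rw [he]
    rcases hf : options.find? (fun o => rankB req lreq dl g o == m) with _ | w
    · rw [hf] at hsome; cases hsome
    · rw [if_pos (show m < 5 by omega)]
  · -- m = 1
    rw [hn0 (by omega)]
    have he : options.find? (fun o => PySem.Str.strip (dget o "label") == req)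
        = options.find? (fun o => rankB req lreq dl g o == m) := by
      apply pv_find?_congr
      intro o ho
      have hlo := pv_minR_le req lreq dl g ho
      rw [← hmm] at hlo
      rcases hb : (PySem.Str.strip (dget o "label") == req) with _ | _
      · symm; simp only [beq_eq_false_iff_ne, ne_eq]; intro hr1
        rw [h] at hr1
        rw [pv_c1_of_rank req lreq dl g o hr1] at hb; cases hb
      · have := pv_rank_le_of_c1 req lreq dl g o hb
        symm; rw [h]; simp; omega
    obtain ⟨o, ho, hr⟩ := pv_minR_attained req lreq dl g (show minR req lreq dl g options < 5 by omega)
    have hsome : (options.find? (fun o => rankB req lreq dl g o == m)).isSome := by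
      rw [List.find?_isSome]; exact ⟨o, ho, by simp [hr, hmm]⟩
    rw [he]
    rcases hf : options.find? (fun o => rankB req lreq dl g o == m) with _ | w
    · rw [hf] at hsome; cases hsome
    · rw [if_pos (show m < 5 by omega)]
  · -- m = 2
    rw [hn0 (by omega), hn1 (by omega)]
    have he : options.find? (fun o => PySem.Str.lower (PySem.Str.strip (dget o "value")) == lreq)
        = options.find? (fun o => rankB req lreq dl g o == m) := by
      apply pv_find?_congr
      intro o ho
      have hlo := pv_minR_le req lreq dl g ho
      rw [← hmm] at hlo
      rcases hb : (PySem.Str.lower (PySem.Str.strip (dget o "value")) == lreq) with _ | _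
      · symm; simp only [beq_eq_false_iff_ne, ne_eq]; intro hr2
        rw [h] at hr2
        rw [pv_c2_of_rank req lreq dl g o hr2] at hb; cases hb
      · have := pv_rank_le_of_c2 req lreq dl g o hb
        symm; rw [h]; simp; omega
    obtain ⟨o, ho, hr⟩ := pv_minR_attained req lreq dl g (show minR req lreq dl g options < 5 by omega)
    have hsome : (options.find? (fun o => rankB req lreq dl g o == m)).isSome := by
      rw [List.find?_isSome]; exact ⟨o, ho, by simp [hr, hmm]⟩
    rw [he]
    rcases hf : options.find? (fun o => rankB req lreq dl g o == m) with _ | w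
    · rw [hf] at hsome; cases hsome
    · rw [if_pos (show m < 5 by omega)]
  · -- m = 3
    rw [hn0 (by omega), hn1 (by omega), hn2 (by omega)]
    have he : options.find? (fun o => PySem.Str.lower (PySem.Str.strip (dget o "label")) == lreq)
        = options.find? (fun o => rankB req lreq dl g o == m) := by
      apply pv_find?_congr
      intro o ho
      have hlo := pv_minR_le req lreq dl g ho
      rw [← hmm] at hlo
      rcases hb : (PySem.Str.lower (PySem.Str.strip (dget o "label")) == lreq) with _ | _
      · symm; simp only [beq_eq_false_iff_ne, ne_eq]; intro hr3
        rw [h] at hr3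
        rw [pv_c3_of_rank req lreq dl g o hr3] at hb; cases hb
      · have := pv_rank_le_of_c3 req lreq dl g o hb
        symm; rw [h]; simp; omega
    obtain ⟨o, ho, hr⟩ := pv_minR_attained req lreq dl g (show minR req lreq dl g options < 5 by omega)
    have hsome : (options.find? (fun o => rankB req lreq dl g o == m)).isSome := by
      rw [List.find?_isSome]; exact ⟨o, ho, by simp [hr, hmm]⟩
    rw [he]
    rcases hf : options.find? (fun o => rankB req lreq dl g o == m) with _ | w
    · rw [hf] at hsome; cases hsome
    · rw [if_pos (show m < 5 by omega)]
  · -- m = 4: the district gate must be true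
    obtain ⟨o, ho, hr⟩ := pv_minR_attained req lreq dl g (show minR req lreq dl g options < 5 by omega)
    have hr4 : rankB req lreq dl g o = 4 := by rw [hr, ← hmm, h]
    have hgt : g = true := (pv_c4_of_rank req lreq dl g o hr4).1
    rw [hn0 (by omega), hn1 (by omega), hn2 (by omega), hn3 (by omega), if_pos hgt]
    have he : options.find? (fun o => PySem.Str.lower (PySem.Str.strip (dget o "label")) == dl)
        = options.find? (fun o => rankB req lreq dl g o == m) := by
      apply pv_find?_congr
      intro o' ho'
      have hlo := pv_minR_le req lreq dl g ho'
      rw [← hmm] at hlo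
      rcases hb : (PySem.Str.lower (PySem.Str.strip (dget o' "label")) == dl) with _ | _
      · symm; simp only [beq_eq_false_iff_ne, ne_eq]; intro hr4'
        rw [h] at hr4'
        rw [(pv_c4_of_rank req lreq dl g o' hr4').2] at hb; cases hb
      · have := pv_rank_le_of_c4 req lreq dl g o' (by rw [hgt]; simpa using hb)
        symm; rw [h]; simp; omega
    have hsome : (options.find? (fun o => rankB req lreq dl g o == m)).isSome := by
      rw [List.find?_isSome]; exact ⟨o, ho, by simp [hr, hmm]⟩
    rw [he]
    rcases hf : options.find? (fun o => rankB req lreq dl g o == m) with _ | w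
    · rw [hf] at hsome; cases hsome
    · rw [if_pos (show m < 5 by omega)]
  · -- m = 5: nothing matches anywhere
    rw [hn0 (by omega), hn1 (by omega), hn2 (by omega), hn3 (by omega)]
    rw [if_neg (show ¬ (m < 5) by omega)]
    rcases hgt : g with _ | _
    · simp
    · rw [if_pos rfl, hn4 (by omega) hgt]
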